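-- pv_equiv track=rewrite | github.com/odylith/odylith | src/odylith/runtime/intervention_engine/stream_state.py | _normalize_block_string
-- ===== SOURCE A (Python) =====
-- from typing import Any
--
-- def _normalize_block_string(value: Any) -> str:
--     text = str(value or "").replace("\r\n", "\n").replace("\r", "\n")
--     rows: list[str] = []
--     blank_run = 0
--     for raw_line in text.split("\n"):
--         line = str(raw_line).rstrip()
--         if not line.strip():
--             blank_run += 1
--             if blank_run > 1:
--                 continue
--             rows.append("")
--             continue
--         blank_run = 0
--         rows.append(line)
--     return "\n".join(rows).strip()
-- ===== SOURCE B (Python) =====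
-- from typing import Any
-- from itertools import groupby
--
-- def _normalize_block_string(value: Any) -> str:
--     text = str(value or "").replace("\r\n", "\n").replace("\r", "\n")
--     lines = [raw.rstrip() for raw in text.split("\n")]
--     paragraphs = ["\n".join(group) for blank, group in groupby(lines, key=lambda l: not l) if not blank]
--     return "\n\n".join(paragraphs).strip()
-- ===== Notes on version B (the rewrite author's own statement) =====
-- stated objective: idiomatic
-- what changed: Replaces A's single stateful loop with a blank_run counter by paragraph extraction: itertools.groupby groups consecutive lines by blankness, each non-blank group becomes a newline-joined paragraph, and the result joins paragraphs with a blank-line separator (blank groups vanish entirely instead of being emitted and re-stripped).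
import Mathlib
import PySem

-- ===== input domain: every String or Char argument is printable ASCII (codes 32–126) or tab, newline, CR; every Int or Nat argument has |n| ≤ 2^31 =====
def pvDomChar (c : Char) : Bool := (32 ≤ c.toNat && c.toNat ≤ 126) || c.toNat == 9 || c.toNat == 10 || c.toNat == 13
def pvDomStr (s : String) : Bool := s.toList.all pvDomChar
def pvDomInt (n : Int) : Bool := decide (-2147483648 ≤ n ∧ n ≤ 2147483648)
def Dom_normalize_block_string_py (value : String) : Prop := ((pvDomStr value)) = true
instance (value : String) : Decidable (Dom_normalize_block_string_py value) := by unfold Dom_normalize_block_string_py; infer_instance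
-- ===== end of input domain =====

-- B replaces A's stateful blank_run-counter loop by paragraph extraction: group consecutive
-- lines by blankness (itertools.groupby), keep the non-blank groups as '\n'-joined paragraphs,
-- and join the paragraphs with "\n\n" (objective: idiomatic).

-- ===== PORT A =====
-- A's loop body: state (rows, blank_run)
def pvStepA (st : List String × Int) (raw_line : String) : List String × Int :=
  let line := PySem.Str.rstrip raw_line
  if PySem.Str.strip line = "" then
    let blank_run := st.2 + 1
    if blank_run > 1 then (st.1, blank_run)
    else (st.1 ++ [""], blank_run)
  else (st.1 ++ [line], 0)

def normalize_block_string_py (value : String) : String :=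
  let text := PySem.Str.replace (PySem.Str.replace (if value = "" then "" else value) "\r\n" "\n") "\r" "\n"
  let rows := (((PySem.Str.split? text "\n").getD []).foldl pvStepA ([], 0)).1
  PySem.Str.strip (PySem.Str.join "\n" rows)

-- ===== PORT B =====
-- itertools.groupby over the lines, keyed by blankness: the list of (key, group) pairs in order
def pvGroupBy : List String → List (Bool × List String)
  | [] => []
  | l :: ls =>
    let k := (l == "")
    (k, l :: ls.takeWhile (fun x => (x == "") == k)) ::
      pvGroupBy (ls.dropWhile (fun x => (x == "") == k))
termination_by xs => xs.length
decreasing_by exact Nat.lt_succ_of_le (List.length_dropWhile_le _ _)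

def normalize_block_string_py_alt (value : String) : String :=
  let text := PySem.Str.replace (PySem.Str.replace (if value = "" then "" else value) "\r\n" "\n") "\r" "\n"
  let lines := ((PySem.Str.split? text "\n").getD []).map PySem.Str.rstrip
  let paragraphs := (pvGroupBy lines).filterMap
    (fun bg => if bg.1 then none else some (PySem.Str.join "\n" bg.2))
  PySem.Str.strip (PySem.Str.join "\n\n" paragraphs)

-- ===== PRECONDITION & SPEC =====
def Spec_normalize_block_string_py (value : String) (out : String) : Prop := out = normalize_block_string_py_alt value
instance (value : String) (out : String) : Decidable (Spec_normalize_block_string_py value out) := by unfold Spec_normalize_block_string_py; infer_instance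

-- ===== CLAIM =====
def Claim_equal_normalize_block_string_py : Prop := ∀ (value : String), Dom_normalize_block_string_py value → Spec_normalize_block_string_py value (normalize_block_string_py value)

-- ===== LEMMAS AND PROOFS =====

-- after rstrip, "line.strip() is empty" is exactly "line is empty"
theorem pv_rstrip_nil_iff (cs : List Char) :
    PySem.Chars.rstrip cs = [] ↔ ∀ c ∈ cs, PySem.Chars.isspace c := by
  simp [PySem.Chars.rstrip, List.dropWhile_eq_nil_iff]

theorem pv_lstrip_allspace (t : List Char) :
    (∀ c ∈ PySem.Chars.lstrip t, PySem.Chars.isspace c) ↔ (∀ c ∈ t, PySem.Chars.isspace c) := by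
  constructor
  · intro h c hc
    rw [← List.takeWhile_append_dropWhile (p := PySem.Chars.isspace) (l := t)] at hc
    rcases List.mem_append.mp hc with h1 | h1
    · exact List.mem_takeWhile_imp h1
    · exact h c h1
  · intro h c hc
    exact h c ((List.dropWhile_sublist _).subset hc)

-- all-whitespace makes rstrip empty (the converse of pv_rstrip_nil_iff, on rstrip's output)
theorem pv_allspace_rstrip (cs : List Char)
    (h : ∀ c ∈ PySem.Chars.rstrip cs, PySem.Chars.isspace c) : PySem.Chars.rstrip cs = [] := by
  unfold PySem.Chars.rstrip at *
  cases hd : List.dropWhile PySem.Chars.isspace cs.reverse with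
  | nil => simp
  | cons x rest =>
    have hne : List.dropWhile PySem.Chars.isspace cs.reverse ≠ [] := by simp [hd]
    have hx : PySem.Chars.isspace ((List.dropWhile PySem.Chars.isspace cs.reverse).head hne) = false :=
      List.head_dropWhile_not _ hne
    have hmem : (List.dropWhile PySem.Chars.isspace cs.reverse).head hne ∈
        (List.dropWhile PySem.Chars.isspace cs.reverse).reverse := by
      simp [List.head_mem]
    exact absurd (h _ hmem) (by simp [hx])

theorem pv_strip_rstrip_empty (r : String) :
    (PySem.Str.strip (PySem.Str.rstrip r) = "") ↔ (PySem.Str.rstrip r = "") := by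
  rw [← String.toList_inj, ← String.toList_inj, PySem.Str.toList_strip, PySem.Str.toList_rstrip]
  show PySem.Chars.rstrip (PySem.Chars.lstrip (PySem.Chars.rstrip r.toList)) = [] ↔ _
  show _ ↔ PySem.Chars.rstrip r.toList = ([] : List Char)
  rw [pv_rstrip_nil_iff, pv_lstrip_allspace]
  constructor
  · exact pv_allspace_rstrip r.toList
  · intro h; rw [h]; intro c hc; simp at hc

-- proof-side description of A's result: collapse each blank run to a single ""
def pvCollapse : List String → List String
  | [] => []
  | l :: ls =>
    if l = "" then "" :: pvCollapse (ls.dropWhile (· == ""))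
    else l :: pvCollapse ls
termination_by xs => xs.length
decreasing_by
  · exact Nat.lt_succ_of_le (List.length_dropWhile_le _ _)
  · exact Nat.lt_succ_of_le (Nat.le_refl _)

theorem pvCollapse_nil : pvCollapse [] = [] := by rw [pvCollapse]

theorem pvCollapse_cons (l : String) (ls : List String) :
    pvCollapse (l :: ls) =
      if l = "" then "" :: pvCollapse (ls.dropWhile (· == ""))
      else l :: pvCollapse ls := by rw [pvCollapse]

-- the fold of A's loop body equals the collapse recursion
theorem pv_loop_eq (L : List String) : ∀ (rows : List String) (b : Int), 0 ≤ b →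
    (L.foldl pvStepA (rows, b)).1 =
      rows ++ (if 1 ≤ b then pvCollapse ((L.map PySem.Str.rstrip).dropWhile (· == ""))
               else pvCollapse (L.map PySem.Str.rstrip)) := by
  induction L with
  | nil => intro rows b _; simp [pvCollapse_nil]
  | cons l L ih =>
    intro rows b hb
    rw [List.foldl_cons]
    by_cases hbl : PySem.Str.strip (PySem.Str.rstrip l) = ""
    · have hl : PySem.Str.rstrip l = "" := (pv_strip_rstrip_empty l).mp hbl
      by_cases h1 : 1 ≤ b
      · have hstep : pvStepA (rows, b) l = (rows, b + 1) := by
          simp [pvStepA, hbl]; omega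
        rw [hstep, ih rows (b + 1) (by omega)]
        simp [h1, show 1 ≤ b + 1 by omega, hl]
      · have hb0 : b = 0 := by omega
        subst hb0
        have hstep : pvStepA (rows, 0) l = (rows ++ [""], 1) := by
          simp [pvStepA, hbl]
        rw [hstep, ih (rows ++ [""]) 1 (by omega)]
        simp [hl, pvCollapse_cons, List.append_assoc]
    · have hl : PySem.Str.rstrip l ≠ "" := fun h => hbl ((pv_strip_rstrip_empty l).mpr h)
      have hstep : pvStepA (rows, b) l = (rows ++ [PySem.Str.rstrip l], 0) := by
        simp [pvStepA, hbl]
      rw [hstep, ih (rows ++ [PySem.Str.rstrip l]) 0 (by omega)]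
      by_cases h1 : 1 ≤ b <;>
        simp [h1, hl, pvCollapse_cons, List.append_assoc]

-- ---- char-level copies of collapse and paragraph extraction ----

def cCollapse : List (List Char) → List (List Char)
  | [] => []
  | l :: ls =>
    if l.isEmpty then [] :: cCollapse (ls.dropWhile (·.isEmpty))
    else l :: cCollapse ls
termination_by xs => xs.length
decreasing_by
  · exact Nat.lt_succ_of_le (List.length_dropWhile_le _ _)
  · exact Nat.lt_succ_of_le (Nat.le_refl _)

def cParas : List (List Char) → List (List Char)
  | [] => []
  | l :: ls =>
    if l.isEmpty then cParas (ls.dropWhile (·.isEmpty))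
    else PySem.Chars.join ['\n'] (l :: ls.takeWhile (fun x => !x.isEmpty)) ::
      cParas (ls.dropWhile (fun x => !x.isEmpty))
termination_by xs => xs.length
decreasing_by
  · exact Nat.lt_succ_of_le (List.length_dropWhile_le _ _)
  · exact Nat.lt_succ_of_le (List.length_dropWhile_le _ _)

theorem cCollapse_nil : cCollapse [] = [] := by rw [cCollapse]
theorem cParas_nil : cParas [] = [] := by rw [cParas]

theorem cCollapse_cons (l : List Char) (ls : List (List Char)) :
    cCollapse (l :: ls) =
      if l.isEmpty then [] :: cCollapse (ls.dropWhile (·.isEmpty))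
      else l :: cCollapse ls := by rw [cCollapse]

theorem cParas_cons (l : List Char) (ls : List (List Char)) :
    cParas (l :: ls) =
      if l.isEmpty then cParas (ls.dropWhile (·.isEmpty))
      else PySem.Chars.join ['\n'] (l :: ls.takeWhile (fun x => !x.isEmpty)) ::
        cParas (ls.dropWhile (fun x => !x.isEmpty)) := by rw [cParas]

-- join over a prefix followed by a nonempty tail
theorem pv_join_append (sep : List Char) (a : List Char) (P X : List (List Char)) (hX : X ≠ []) :
    PySem.Chars.join sep ((a :: P) ++ X) =
      PySem.Chars.join sep (a :: P) ++ sep ++ PySem.Chars.join sep X := by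
  induction P generalizing a with
  | nil =>
    cases X with
    | nil => exact absurd rfl hX
    | cons y ys => simp [PySem.Chars.join_cons_cons, PySem.Chars.join_singleton]
  | cons b P ih =>
    have h1 : ((a :: b :: P) ++ X) = a :: ((b :: P) ++ X) := by simp
    rw [h1]
    have h2 : (b :: P) ++ X = b :: (P ++ X) := by simp
    have h3 : PySem.Chars.join sep (a :: ((b :: P) ++ X)) =
        a ++ sep ++ PySem.Chars.join sep ((b :: P) ++ X) := by
      rw [h2]
      cases hpx : P ++ X with
      | nil => simp [List.append_eq_nil_iff] at hpx; exact absurd hpx.2 hX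
      | cons z zs => rw [← hpx, ← h2]; exact PySem.Chars.join_cons_cons sep a b (P ++ X)
    rw [h3, ih b, PySem.Chars.join_cons_cons]
    simp [List.append_assoc]

theorem pv_collapse_nonblank_prefix (run rest : List (List Char))
    (h : ∀ r ∈ run, r.isEmpty = false) :
    cCollapse (run ++ rest) = run ++ cCollapse rest := by
  induction run with
  | nil => simp
  | cons r run ih =>
    have hr : r.isEmpty = false := h r (by simp)
    simp only [List.cons_append, cCollapse_cons, hr, if_neg Bool.false_ne_true]
    rw [ih (fun x hx => h x (by simp [hx]))]

-- ---- whitespace-stripping toolkit ----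

theorem pv_rstrip_cons (c : Char) (t : List Char) :
    PySem.Chars.rstrip (c :: t) =
      if PySem.Chars.rstrip t = [] then (if PySem.Chars.isspace c then [] else [c])
      else c :: PySem.Chars.rstrip t := by
  have hiff : PySem.Chars.rstrip t = [] ↔ (List.dropWhile PySem.Chars.isspace t.reverse) = [] := by
    simp [PySem.Chars.rstrip]
  simp only [PySem.Chars.rstrip, List.reverse_cons, List.dropWhile_append]
  by_cases hd : List.dropWhile PySem.Chars.isspace t.reverse = []
  · simp only [hd, List.isEmpty_nil, if_true, List.reverse_nil, List.dropWhile]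
    by_cases hc : PySem.Chars.isspace c <;> simp [hc]
  · simp [hd]

theorem pv_lstrip_rstrip_comm (s : List Char) :
    PySem.Chars.lstrip (PySem.Chars.rstrip s) = PySem.Chars.rstrip (PySem.Chars.lstrip s) := by
  induction s with
  | nil => simp [PySem.Chars.lstrip, PySem.Chars.rstrip]
  | cons c t ih =>
    rw [pv_rstrip_cons]
    by_cases hc : PySem.Chars.isspace c
    · by_cases hrt : PySem.Chars.rstrip t = []
      · rw [if_pos hrt, if_pos hc,
            show PySem.Chars.lstrip (c :: t) = PySem.Chars.lstrip t from by
              simp [PySem.Chars.lstrip, List.dropWhile, hc],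
            ← ih, hrt]
      · simp only [hrt, if_false, if_pos hc]
        rw [show PySem.Chars.lstrip (c :: PySem.Chars.rstrip t) = PySem.Chars.lstrip (PySem.Chars.rstrip t) by
              simp [PySem.Chars.lstrip, List.dropWhile, hc],
            show PySem.Chars.lstrip (c :: t) = PySem.Chars.lstrip t by
              simp [PySem.Chars.lstrip, List.dropWhile, hc]]
        exact ih
    · have hl : PySem.Chars.lstrip (c :: t) = c :: t := by
        simp [PySem.Chars.lstrip, List.dropWhile, hc]
      rw [hl, pv_rstrip_cons]
      by_cases hrt : PySem.Chars.rstrip t = [] <;>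
        simp [hrt, hc, PySem.Chars.lstrip]

theorem pv_rstrip_append_congr (p s1 s2 : List Char)
    (h : PySem.Chars.rstrip s1 = PySem.Chars.rstrip s2) :
    PySem.Chars.rstrip (p ++ s1) = PySem.Chars.rstrip (p ++ s2) := by
  simp only [PySem.Chars.rstrip, List.reverse_append, List.dropWhile_append] at *
  have h' : List.dropWhile PySem.Chars.isspace s1.reverse = List.dropWhile PySem.Chars.isspace s2.reverse := by
    have := congrArg List.reverse h; simpa using this
  rw [h']

theorem pv_strip_newline_cons (s : List Char) :
    PySem.Chars.strip ('\n' :: s) = PySem.Chars.strip s := by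
  simp [PySem.Chars.strip, PySem.Chars.lstrip, List.dropWhile, PySem.Chars.isspace]

theorem pv_head_dropWhile_false {α : Type} (p : α → Bool) (l ls : List α) (b : α)
    (h : List.dropWhile p l = b :: ls) : p b = false := by
  have hne : List.dropWhile p l ≠ [] := by simp [h]
  have h2 := List.head_dropWhile_not p hne
  simp only [h, List.head_cons] at h2
  exact h2
theorem pv_core_aux : ∀ (n : Nat) (M : List (List Char)), M.length ≤ n →
    (∀ h, M.head? = some h → h ≠ []) →
    PySem.Chars.rstrip (PySem.Chars.join ['\n'] (cCollapse M)) =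
      PySem.Chars.rstrip (PySem.Chars.join ['\n', '\n'] (cParas M)) := by
  intro n
  induction n with
  | zero =>
    intro M hM _
    rw [List.length_eq_zero_iff.mp (Nat.le_zero.mp hM), cCollapse_nil, cParas_nil,
      PySem.Chars.join_nil, PySem.Chars.join_nil]
  | succ n ih =>
    intro M hM hhd
    cases M with
    | nil => rw [cCollapse_nil, cParas_nil, PySem.Chars.join_nil, PySem.Chars.join_nil]
    | cons l ls =>
      have hl : l ≠ [] := hhd l rfl
      have hle : l.isEmpty = false := by simp [hl]
      set run := ls.takeWhile (fun x => !x.isEmpty) with hrun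
      set rest := ls.dropWhile (fun x => !x.isEmpty) with hrest
      have hsplit : l :: ls = (l :: run) ++ rest := by
        rw [hrun, hrest]; simp [List.takeWhile_append_dropWhile]
      have hnb : ∀ r ∈ l :: run, r.isEmpty = false := by
        intro r hr
        rcases List.mem_cons.mp hr with h1 | h1
        · rw [h1]; exact hle
        · have := List.mem_takeWhile_imp h1; simpa using this
      have hcol : cCollapse (l :: ls) = (l :: run) ++ cCollapse rest := by
        rw [hsplit]; exact pv_collapse_nonblank_prefix (l :: run) rest hnb
      have hpar : cParas (l :: ls) =
          PySem.Chars.join ['\n'] (l :: run) :: cParas rest := by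
        rw [cParas_cons, if_neg (by simp [hle])]
      rw [hcol, hpar]
      cases hr : rest with
      | nil =>
        simp only [cCollapse_nil, cParas_nil, List.append_nil, PySem.Chars.join_singleton]
      | cons b ls2 =>
        have hb : b = [] := by
          have := pv_head_dropWhile_false (fun x => !x.isEmpty) ls ls2 b (hrest.symm.trans hr)
          simpa using this
        have hcolrest : cCollapse rest = [] :: cCollapse (ls2.dropWhile (·.isEmpty)) := by
          rw [hr, hb, cCollapse_cons]; simp
        have hparrest : cParas rest = cParas (ls2.dropWhile (·.isEmpty)) := by
          rw [hr, hb, cParas_cons]; simp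
        set rest' := ls2.dropWhile (·.isEmpty) with hrest'
        have hlen' : rest'.length ≤ n := by
          have h1 : rest'.length ≤ ls2.length := List.length_dropWhile_le _ _
          have h2 : rest.length ≤ ls.length := by rw [hrest]; exact List.length_dropWhile_le _ _
          have h3 : ls2.length < rest.length := by rw [hr]; simp
          simp only [List.length_cons] at hM
          omega
        rw [← hr, hcolrest, hparrest]
        cases hr' : rest' with
        | nil =>
          rw [cCollapse_nil, cParas_nil]
          rw [pv_join_append ['\n'] l run [[]] (by simp), PySem.Chars.join_singleton,
            PySem.Chars.join_singleton, List.append_assoc]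
          simpa using pv_rstrip_append_congr (PySem.Chars.join ['\n'] (l :: run)) (['\n'] : List Char) [] (by decide)
        | cons m t =>
          have hm : m ≠ [] := by
            have := pv_head_dropWhile_false (fun x : List Char => x.isEmpty) ls2 t m (hrest'.symm.trans hr')
            simpa using this
          have hih := ih (m :: t) (hr' ▸ hlen') (by intro h hh; simp at hh; rw [← hh]; exact hm)
          have hcolne : cCollapse (m :: t) ≠ [] := by
            rw [cCollapse_cons, if_neg (by simp [hm])]; simp
          have hparne : cParas (m :: t) ≠ [] := by
            rw [cParas_cons, if_neg (by simp [hm])]; simp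
          rw [pv_join_append ['\n'] l run ([] :: cCollapse (m :: t)) (by simp)]
          have hj1 : PySem.Chars.join ['\n'] ([] :: cCollapse (m :: t)) =
              [] ++ ['\n'] ++ PySem.Chars.join ['\n'] (cCollapse (m :: t)) := by
            cases hc : cCollapse (m :: t) with
            | nil => exact absurd hc hcolne
            | cons y ys => exact PySem.Chars.join_cons_cons _ _ _ _
          rw [hj1]
          have hj2 : PySem.Chars.join ['\n', '\n'] (PySem.Chars.join ['\n'] (l :: run) :: cParas (m :: t)) =
              PySem.Chars.join ['\n'] (l :: run) ++ ['\n', '\n'] ++ PySem.Chars.join ['\n', '\n'] (cParas (m :: t)) := by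
            cases hc : cParas (m :: t) with
            | nil => exact absurd hc hparne
            | cons y ys => exact PySem.Chars.join_cons_cons _ _ _ _
          rw [hj2]
          have hassoc1 : PySem.Chars.join ['\n'] (l :: run) ++ ['\n'] ++ ([] ++ ['\n'] ++ PySem.Chars.join ['\n'] (cCollapse (m :: t))) =
              (PySem.Chars.join ['\n'] (l :: run) ++ ['\n', '\n']) ++ PySem.Chars.join ['\n'] (cCollapse (m :: t)) := by
            simp
          have hassoc2 : PySem.Chars.join ['\n'] (l :: run) ++ ['\n', '\n'] ++ PySem.Chars.join ['\n', '\n'] (cParas (m :: t)) =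
              (PySem.Chars.join ['\n'] (l :: run) ++ ['\n', '\n']) ++ PySem.Chars.join ['\n', '\n'] (cParas (m :: t)) := by
            simp
          rw [hassoc1, hassoc2]
          exact pv_rstrip_append_congr _ _ _ hih

theorem pv_top_aux : ∀ (n : Nat) (M : List (List Char)), M.length ≤ n →
    PySem.Chars.strip (PySem.Chars.join ['\n'] (cCollapse M)) =
      PySem.Chars.strip (PySem.Chars.join ['\n', '\n'] (cParas M)) := by
  intro n
  induction n with
  | zero =>
    intro M hM
    rw [List.length_eq_zero_iff.mp (Nat.le_zero.mp hM), cCollapse_nil, cParas_nil,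
      PySem.Chars.join_nil, PySem.Chars.join_nil]
  | succ n ih =>
    intro M hM
    by_cases hhd : ∀ h, M.head? = some h → h ≠ []
    · have hcore := pv_core_aux (n + 1) M hM hhd
      show PySem.Chars.rstrip (PySem.Chars.lstrip _) = PySem.Chars.rstrip (PySem.Chars.lstrip _)
      rw [← pv_lstrip_rstrip_comm, ← pv_lstrip_rstrip_comm, hcore]
    · push Not at hhd
      obtain ⟨h0, hh1, hh2⟩ := hhd
      cases M with
      | nil => simp at hh1
      | cons l ls =>
        simp at hh1; subst hh1
        rw [hh2] at *
        rw [cCollapse_cons, cParas_cons]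
        simp only [List.isEmpty_nil, if_true]
        have hih := ih (ls.dropWhile (·.isEmpty)) (by
          have := List.length_dropWhile_le (·.isEmpty) ls
          simp only [List.length_cons] at hM; omega)
        cases hc : cCollapse (ls.dropWhile (·.isEmpty)) with
        | nil =>
          rw [hc] at hih
          rw [PySem.Chars.join_singleton]
          rw [PySem.Chars.join_nil] at hih
          have : PySem.Chars.strip ([] : List Char) = [] := rfl
          rw [← hih]
        | cons y ys =>
          rw [hc] at hih
          rw [show PySem.Chars.join ['\n'] ([] :: y :: ys) = [] ++ ['\n'] ++ PySem.Chars.join ['\n'] (y :: ys) from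
            PySem.Chars.join_cons_cons _ _ _ _]
          simp only [List.nil_append, List.singleton_append]
          rw [pv_strip_newline_cons]
          exact hih
theorem pv_beq_empty (x : String) : (x == "") = x.toList.isEmpty := by
  by_cases h : x = ""
  · simp [h]
  · have h2 : x.toList ≠ [] := by
      intro hl; apply h; rw [← String.toList_inj]; simpa using hl
    rw [beq_eq_false_iff_ne.mpr h, Eq.comm, List.isEmpty_eq_false_iff]
    exact h2

theorem pv_toList_ne (l : String) (hl : ¬ l = "") : l.toList ≠ [] := by
  intro h; apply hl; rw [← String.toList_inj]; simpa using h

theorem pv_map_collapse (L : List String) :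
    (pvCollapse L).map String.toList = cCollapse (L.map String.toList) := by
  induction L using pvCollapse.induct with
  | case1 => simp [pvCollapse, cCollapse_nil]
  | case2 ls ih =>
    rw [pvCollapse_cons, if_pos rfl, List.map_cons, List.map_cons, cCollapse_cons,
      if_pos (by simp), List.dropWhile_map]
    have hpred : ((fun x : List Char => x.isEmpty) ∘ String.toList) = (· == "") := by
      funext x; simp only [Function.comp]; exact (pv_beq_empty x).symm
    rw [hpred]
    simpa using ih
  | case3 l ls hl ih =>
    rw [pvCollapse_cons, if_neg hl, List.map_cons, List.map_cons, cCollapse_cons,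
      if_neg (by simp [pv_toList_ne l hl]), ih]

theorem pv_map_paras (L : List String) :
    ((pvGroupBy L).filterMap
      (fun bg => if bg.1 then none else some (PySem.Str.join "\n" bg.2))).map String.toList
      = cParas (L.map String.toList) := by
  induction L using pvGroupBy.induct with
  | case1 => simp [pvGroupBy, cParas_nil]
  | case2 l ls kk ih =>
    have ih2 : ((pvGroupBy (ls.dropWhile (fun x => (x == "") == (l == "")))).filterMap
        (fun bg => if bg.1 then none else some (PySem.Str.join "\n" bg.2))).map String.toList
        = cParas ((ls.dropWhile (fun x => (x == "") == (l == ""))).map String.toList) := ih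
    clear ih
    rw [pvGroupBy]
    by_cases hl : l = ""
    · subst hl
      have hpred2 : ((fun x : List Char => x.isEmpty) ∘ String.toList) = (· == "") := by
        funext x; simp only [Function.comp]; exact (pv_beq_empty x).symm
      simp only [List.filterMap_cons]
      simp [cParas_cons, List.dropWhile_map, hpred2]
      simpa using ih2
    · have hk : (l == "") = false := beq_eq_false_iff_ne.mpr hl
      simp only [hk] at ih2 ⊢
      have hpred1 : (fun x : String => (x == "") == false) = (fun x => !(x == "")) := by
        funext x; simp
      have hpred2 : ((fun x : List Char => !x.isEmpty) ∘ String.toList) = (fun x => !(x == "")) := by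
        funext x; simp only [Function.comp]; rw [pv_beq_empty x]
      rw [hpred1] at ih2
      simp only [List.filterMap_cons]
      simp only [if_neg (by simp : ¬ (false = true))]
      simp only [List.map_cons, cParas_cons, if_neg (by simp [pv_toList_ne l hl] : ¬ (l.toList.isEmpty = true))]
      rw [List.takeWhile_map, List.dropWhile_map, hpred2, hpred1, ih2]
      congr 1
      simp [PySem.Str.toList_join]

-- ===== VERDICT (by name: the statement is the Claim_ definition above) =====
theorem normalize_block_string_py_spec : Claim_equal_normalize_block_string_py := by
  intro value _
  unfold Spec_normalize_block_string_py normalize_block_string_py normalize_block_string_py_alt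
  have h := pv_loop_eq (((PySem.Str.split? (PySem.Str.replace (PySem.Str.replace (if value = "" then "" else value) "\r\n" "\n") "\r" "\n") "\n")).getD []) [] 0 (by omega)
  simp only [h]
  norm_num
  rw [← String.toList_inj]
  simp only [PySem.Str.toList_strip, PySem.Str.toList_join]
  rw [pv_map_collapse, pv_map_paras]
  exact pv_top_aux _ _ (Nat.le_refl _)
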